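-- pv_equiv track=rewrite | github.com/mohamadrezavilani/TensorTitans | DataCleaning/DataCleaningFunctions_Persian.py | separate_cases
-- ===== SOURCE A (Python) =====
-- def separate_cases(text):
--     # Separate joined words that mix numbers and letters or different cases
--     if len(text) <= 1:
--         return ' '
--
--     new_text = ""
--     last_char_all_num = text[0].isalnum()  # Check if the first character is alphanumeric
--
--     for char in text:
--         # Separate the text when transitioning between numbers/letters or cases
--         if char.isalnum() != last_char_all_num and char.isalnum():
--             new_text += " " + char
--         else:
--             new_text += char
--
--         last_char_all_num = char.isalnum()  # Update the last character type
--
--     return new_text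
-- ===== SOURCE B (Python) =====
-- def separate_cases(text):
--     # Same result, computed run-by-run: split the text into maximal runs of
--     # alphanumeric / non-alphanumeric characters and prepend a space to every
--     # alphanumeric run except one that starts the text.
--     if len(text) <= 1:
--         return ' '
--     pieces = []
--     i, n = 0, len(text)
--     while i < n:
--         k = text[i].isalnum()
--         j = i + 1
--         while j < n and text[j].isalnum() == k:
--             j += 1
--         if k and pieces:
--             pieces.append(' ')
--         pieces.append(text[i:j])
--         i = j
--     return ''.join(pieces)
-- ===== Notes on version B (the rewrite author's own statement) =====
-- stated objective: alternative
-- what changed: A is a per-character state machine that carries the previous character's isalnum flag and appends char by char; B instead splits the text into maximal alnum/non-alnum runs and joins them, prepending a space to each alphanumeric run except a leading one.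
import Mathlib
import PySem

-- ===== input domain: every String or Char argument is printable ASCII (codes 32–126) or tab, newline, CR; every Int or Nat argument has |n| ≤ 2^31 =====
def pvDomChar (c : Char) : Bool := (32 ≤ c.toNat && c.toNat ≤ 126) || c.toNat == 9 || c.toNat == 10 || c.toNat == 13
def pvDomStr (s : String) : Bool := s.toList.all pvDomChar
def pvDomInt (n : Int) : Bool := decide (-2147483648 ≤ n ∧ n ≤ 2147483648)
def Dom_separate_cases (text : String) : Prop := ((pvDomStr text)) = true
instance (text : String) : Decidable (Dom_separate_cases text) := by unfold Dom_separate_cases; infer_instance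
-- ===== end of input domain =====

-- B rebuilds the string from maximal alnum/non-alnum runs instead of A's
-- per-character state machine; same return value everywhere (objective: alternative).

-- ===== PORT A =====
-- per-character loop carrying the previous character's isalnum flag
def separate_cases (text : String) : String :=
  let l := text.toList
  if l.length ≤ 1 then " "
  else
    -- text[0].isalnum(): l is nonempty here, headD's default is never used
    let last0 := PySem.Chars.isalnum (l.headD ' ')
    let r := l.foldl (fun (st : List Char × Bool) c =>
      if (PySem.Chars.isalnum c != st.2) && PySem.Chars.isalnum c then
        (st.1 ++ [' ', c], PySem.Chars.isalnum c)
      else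
        (st.1 ++ [c], PySem.Chars.isalnum c)) ([], last0)
    String.mk r.1

-- ===== PORT B =====
-- the outer while loop of Source B: peel one maximal run (the inner while = takeWhile/dropWhile),
-- prepend a space to an alnum run unless it is the first piece
def bRuns : List Char → Bool → List Char
  | [], _ => []
  | c :: rest, first =>
    let k := PySem.Chars.isalnum c
    let run := c :: rest.takeWhile (fun x => PySem.Chars.isalnum x == k)
    let rest' := rest.dropWhile (fun x => PySem.Chars.isalnum x == k)
    (if k && !first then ' ' :: run else run) ++ bRuns rest' false
termination_by l => l.length
decreasing_by
  have := List.length_dropWhile_le (p := fun x => PySem.Chars.isalnum x == k) (l := rest)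
  simpa using Nat.lt_succ_of_le this

def separate_cases_alt (text : String) : String :=
  let l := text.toList
  if l.length ≤ 1 then " " else String.mk (bRuns l true)

-- ===== PRECONDITION & SPEC =====
def Spec_separate_cases (text : String) (out : String) : Prop := out = separate_cases_alt text
instance (text : String) (out : String) : Decidable (Spec_separate_cases text out) := by unfold Spec_separate_cases; infer_instance

-- ===== CLAIM (what is proved, stated in full; the proofs are below) =====
def Claim_equal_separate_cases : Prop := ∀ (text : String), Dom_separate_cases text → Spec_separate_cases text (separate_cases text)

-- ===== LEMMAS AND PROOFS =====

-- A's loop, written as structural recursion without the accumulator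
def aGo : Bool → List Char → List Char
  | _, [] => []
  | last, c :: rest =>
    (if (PySem.Chars.isalnum c != last) && PySem.Chars.isalnum c then [' ', c] else [c])
      ++ aGo (PySem.Chars.isalnum c) rest

theorem foldl_eq_aGo (l : List Char) : ∀ (acc : List Char) (last : Bool),
    (l.foldl (fun (st : List Char × Bool) c =>
      if (PySem.Chars.isalnum c != st.2) && PySem.Chars.isalnum c then
        (st.1 ++ [' ', c], PySem.Chars.isalnum c)
      else
        (st.1 ++ [c], PySem.Chars.isalnum c)) (acc, last)).1 = acc ++ aGo last l := by
  induction l with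
  | nil => intro acc last; simp [aGo]
  | cons c rest ih =>
    intro acc last
    rw [List.foldl_cons]
    by_cases h : ((PySem.Chars.isalnum c != last) && PySem.Chars.isalnum c) = true
    · rw [if_pos h, ih]; simp only [aGo, if_pos h]; simp
    · rw [if_neg h, ih]; simp only [aGo, if_neg h]; simp

-- inside a run (every char has key k, state already k) A copies characters verbatim
theorem aGo_run (k : Bool) : ∀ (tw rest : List Char),
    (∀ x ∈ tw, PySem.Chars.isalnum x = k) → aGo k (tw ++ rest) = tw ++ aGo k rest := by
  intro tw
  induction tw with
  | nil => intro rest _; simp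
  | cons x tl ih =>
    intro rest h
    have hx : PySem.Chars.isalnum x = k := h x (by simp)
    simp [aGo, hx, ih rest (fun y hy => h y (by simp [hy]))]

-- the invariant linking A's carried flag to B's 'first piece' flag
theorem aGo_eq_bRuns : ∀ (n : ℕ) (l : List Char) (first last : Bool),
    l.length ≤ n → (∀ c, l.head? = some c → last = (first == PySem.Chars.isalnum c)) →
    aGo last l = bRuns l first := by
  intro n
  induction n with
  | zero =>
    intro l first last hn _
    have : l = [] := List.length_eq_zero_iff.mp (Nat.le_zero.mp hn)
    subst this; simp [aGo, bRuns]
  | succ n ih =>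
    intro l first last hn hhead
    match l with
    | [] => simp [aGo, bRuns]
    | c :: rest =>
      have hlast : last = (first == PySem.Chars.isalnum c) := hhead c rfl
      have hrest : rest = rest.takeWhile (fun x => PySem.Chars.isalnum x == PySem.Chars.isalnum c)
          ++ rest.dropWhile (fun x => PySem.Chars.isalnum x == PySem.Chars.isalnum c) :=
        (List.takeWhile_append_dropWhile).symm
      have htw : ∀ x ∈ rest.takeWhile (fun x => PySem.Chars.isalnum x == PySem.Chars.isalnum c),
          PySem.Chars.isalnum x = PySem.Chars.isalnum c := by
        intro x hx
        have := List.mem_takeWhile_imp hx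
        simpa using this
      -- the first character of the remainder fails the predicate, giving the IH its invariant
      have hdrop : ∀ c',
          (rest.dropWhile (fun x => PySem.Chars.isalnum x == PySem.Chars.isalnum c)).head? = some c' →
          PySem.Chars.isalnum c = (false == PySem.Chars.isalnum c') := by
        intro c' hc'
        have hne := List.head?_dropWhile_not
          (p := fun x => PySem.Chars.isalnum x == PySem.Chars.isalnum c) (l := rest)
        rw [hc'] at hne
        cases h1 : PySem.Chars.isalnum c' <;> cases h2 : PySem.Chars.isalnum c <;>
          simp [h1, h2] at hne ⊢
      have hlen : (rest.dropWhile (fun x => PySem.Chars.isalnum x == PySem.Chars.isalnum c)).length ≤ n := by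
        have h1 := List.length_dropWhile_le
          (p := fun x => PySem.Chars.isalnum x == PySem.Chars.isalnum c) (l := rest)
        have h2 : rest.length ≤ n := by simpa using Nat.lt_succ_iff.mp (by simpa using hn)
        omega
      have hih := ih (rest.dropWhile (fun x => PySem.Chars.isalnum x == PySem.Chars.isalnum c))
        false (PySem.Chars.isalnum c) hlen hdrop
      have hcond : ((PySem.Chars.isalnum c != last) && PySem.Chars.isalnum c)
          = (PySem.Chars.isalnum c && !first) := by
        subst hlast; cases first <;> cases PySem.Chars.isalnum c <;> rfl
      calc aGo last (c :: rest)
          = (if (PySem.Chars.isalnum c != last) && PySem.Chars.isalnum c then [' ', c] else [c])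
              ++ aGo (PySem.Chars.isalnum c) rest := by
            simp [aGo]
        _ = (if PySem.Chars.isalnum c && !first then [' ', c] else [c])
              ++ (rest.takeWhile (fun x => PySem.Chars.isalnum x == PySem.Chars.isalnum c)
                  ++ aGo (PySem.Chars.isalnum c)
                      (rest.dropWhile (fun x => PySem.Chars.isalnum x == PySem.Chars.isalnum c))) := by
            rw [hcond, ← aGo_run _ _ _ htw, ← hrest]
        _ = bRuns (c :: rest) first := by
            rw [hih, bRuns]
            cases hc : (PySem.Chars.isalnum c && !first) <;> simp [hc]

-- ===== VERDICT (by name: the statement is the Claim_ definition above) =====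
theorem separate_cases_spec : Claim_equal_separate_cases := by
  intro text _
  unfold Spec_separate_cases
  simp only [separate_cases, separate_cases_alt]
  by_cases h : text.toList.length ≤ 1
  · rw [if_pos h, if_pos h]
  · rw [if_neg h, if_neg h]
    match hl : text.toList with
    | [] => simp [hl] at h
    | c :: rest =>
      have : PySem.Chars.isalnum ((c :: rest).headD ' ') = PySem.Chars.isalnum c := by simp
      rw [this, foldl_eq_aGo, List.nil_append,
        aGo_eq_bRuns (c :: rest).length (c :: rest) true _ le_rfl
          (by intro c' hc'; simp at hc'; simp [hc'])]
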